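-- pv_equiv track=rewrite | github.com/YeastCoast/SudokuWeb | sudoku_web/src/solving_algorithm.py | effect_range
-- ===== SOURCE A (Python) =====
-- import math
--
-- def block_coords(coord):
--     block_row = math.floor(coord[0] / 3)
--     block_col = math.floor(coord[1] / 3)
--     for i in range(block_row * 3, (block_row + 1) * 3):
--         for j in range(block_col * 3, (block_col + 1) * 3):
--             yield i, j
--
-- def col_coords(coord):
--     for i in range(0, 9):
--         yield i, coord[1]
--
-- def row_coords(coord):
--     for i in range(0, 9):
--         yield coord[0], i
--
-- def effect_range(coord, pending_coords):
--     affected_coords = []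
--     checkers = [block_coords(coord), row_coords(coord), col_coords(coord)]
--     for checker in checkers:
--         for i in checker:
--             if i not in affected_coords and i in pending_coords and i != coord:
--                 affected_coords.append(i)
--     return affected_coords
-- ===== SOURCE B (Python) =====
-- def effect_range(coord, pending_coords):
--     # Closed-form geometry: coord's block always contains the row segment
--     # (r, bc*3..bc*3+2) and the column segment (br*3..br*3+2, c), and coord
--     # itself - so instead of a dedup list, a row/column cell is new exactly
--     # when its running index lies outside the block band (i // 3 != bc / br).
--     r, c = coord
--     br, bc = r // 3, c // 3
--     block = [(i, j)
--              for i in range(br * 3, br * 3 + 3)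
--              for j in range(bc * 3, bc * 3 + 3)
--              if (i, j) != coord and (i, j) in pending_coords]
--     row = [(r, i) for i in range(9) if i // 3 != bc and (r, i) in pending_coords]
--     col = [(i, c) for i in range(9) if i // 3 != br and (i, c) in pending_coords]
--     return block + row + col
-- ===== Notes on version B (the rewrite author's own statement) =====
-- stated objective: alternative
-- what changed: B eliminates A's dedup-by-list-membership entirely: it emits the block cells and then generates only the genuinely new row/column cells by a closed-form arithmetic overlap test (i // 3 != block index), exploiting that coord's block always contains the overlapping row/column segments and coord itself; A instead scans an accumulator list for every candidate cell.
import Mathlib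
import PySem

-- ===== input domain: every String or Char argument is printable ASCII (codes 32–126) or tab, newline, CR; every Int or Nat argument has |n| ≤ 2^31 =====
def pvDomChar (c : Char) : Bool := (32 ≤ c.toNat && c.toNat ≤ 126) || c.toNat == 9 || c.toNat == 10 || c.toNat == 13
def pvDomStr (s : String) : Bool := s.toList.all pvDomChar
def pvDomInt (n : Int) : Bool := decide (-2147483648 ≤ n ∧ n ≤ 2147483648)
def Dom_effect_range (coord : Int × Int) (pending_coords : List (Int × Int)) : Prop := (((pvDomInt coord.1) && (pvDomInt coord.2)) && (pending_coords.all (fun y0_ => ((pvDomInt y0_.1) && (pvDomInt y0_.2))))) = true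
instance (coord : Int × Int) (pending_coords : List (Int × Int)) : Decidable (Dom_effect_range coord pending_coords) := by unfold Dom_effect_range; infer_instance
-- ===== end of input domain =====

-- B removes A's dedup-by-membership-list entirely: since coord's block contains the overlapping row
-- and column segments and coord itself, B emits the block cells and then only the row/column cells
-- whose running index lies outside the block band (closed-form test i // 3 != block index).


-- ===== PORT A =====
-- math.floor(coord[0] / 3) is exact integer floor-division for |n| ≤ 2^31 (well inside double
-- precision), so it is ported as PySem.Int.floordiv.
def pvBlockCoordsA (coord : Int × Int) : List (Int × Int) :=
  let block_row := PySem.Int.floordiv coord.1 3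
  let block_col := PySem.Int.floordiv coord.2 3
  (PySem.List.pyRange (block_row * 3) ((block_row + 1) * 3) 1).flatMap (fun i =>
    (PySem.List.pyRange (block_col * 3) ((block_col + 1) * 3) 1).map (fun j => (i, j)))

def pvColCoordsA (coord : Int × Int) : List (Int × Int) :=
  (PySem.List.pyRange 0 9 1).map (fun i => (i, coord.2))

def pvRowCoordsA (coord : Int × Int) : List (Int × Int) :=
  (PySem.List.pyRange 0 9 1).map (fun i => (coord.1, i))

def effect_range (coord : Int × Int) (pending_coords : List (Int × Int)) : List (Int × Int) :=
  [pvBlockCoordsA coord, pvRowCoordsA coord, pvColCoordsA coord].foldl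
    (fun affected checker =>
      checker.foldl
        (fun affected i =>
          if ¬ affected.contains i ∧ pending_coords.contains i ∧ i ≠ coord
          then affected ++ [i] else affected)
        affected)
    []

-- ===== PORT B =====
def effect_range_alt (coord : Int × Int) (pending_coords : List (Int × Int)) : List (Int × Int) :=
  let r := coord.1
  let c := coord.2
  let br := PySem.Int.floordiv r 3
  let bc := PySem.Int.floordiv c 3
  let block := (PySem.List.pyRange (br * 3) (br * 3 + 3) 1).flatMap (fun i =>
    ((PySem.List.pyRange (bc * 3) (bc * 3 + 3) 1).map (fun j => (i, j))).filter
      (fun p => decide (p ≠ coord ∧ pending_coords.contains p)))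
  let row := ((PySem.List.pyRange 0 9 1).filter
      (fun i => decide (PySem.Int.floordiv i 3 ≠ bc ∧ pending_coords.contains (r, i)))).map
      (fun i => (r, i))
  let col := ((PySem.List.pyRange 0 9 1).filter
      (fun i => decide (PySem.Int.floordiv i 3 ≠ br ∧ pending_coords.contains (i, c)))).map
      (fun i => (i, c))
  block ++ row ++ col

-- ===== PRECONDITION & SPEC =====
def Spec_effect_range (coord : Int × Int) (pending_coords : List (Int × Int)) (out : List (Int × Int)) : Prop := out = effect_range_alt coord pending_coords
instance (coord : Int × Int) (pending_coords : List (Int × Int)) (out : List (Int × Int)) : Decidable (Spec_effect_range coord pending_coords out) := by unfold Spec_effect_range; infer_instance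

-- ===== CLAIM (what is proved, stated in full; the proofs are below) =====
def Claim_equal_effect_range : Prop := ∀ (coord : Int × Int) (pending_coords : List (Int × Int)), Dom_effect_range coord pending_coords → Spec_effect_range coord pending_coords (effect_range coord pending_coords)

-- ===== LEMMAS AND PROOFS =====

-- A's interleaved loop over any cell list L equals: dedup-excluding-coord then pending-filter.
theorem pv_interleave_eq_filter_dedup (coord : Int × Int) (pend : List (Int × Int)) :
    ∀ (L acc : List (Int × Int)),
      L.foldl
        (fun affected i =>
          if ¬ affected.contains i ∧ pend.contains i ∧ i ≠ coord
          then affected ++ [i] else affected)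
        (acc.filter (fun c => pend.contains c))
      = (L.foldl
          (fun peers c => if c ≠ coord ∧ ¬ peers.contains c then peers ++ [c] else peers) acc).filter
          (fun c => pend.contains c) := by
  intro L
  induction L with
  | nil => intro acc; simp
  | cons c L ih =>
    intro acc
    simp only [List.foldl_cons]
    by_cases hpend : pend.contains c
    · by_cases hc : c = coord
      · subst hc
        simp only [List.contains_eq_mem, List.mem_filter] at *
        rw [if_neg (by simp), if_neg (by simp)]
        exact ih acc
      · by_cases hacc : acc.contains c
        · rw [if_neg, if_neg]
          · exact ih acc
          · simp_all [List.contains_eq_mem]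
          · simp_all [List.contains_eq_mem]
        · rw [if_pos, if_pos]
          · have : (acc ++ [c]).filter (fun c => pend.contains c)
                = acc.filter (fun c => pend.contains c) ++ [c] := by
              simp_all [List.filter_append, List.contains_eq_mem]
            rw [← this]; exact ih (acc ++ [c])
          · simp_all [List.contains_eq_mem]
          · simp_all [List.contains_eq_mem]
    · rw [if_neg (by simp_all [List.contains_eq_mem])]
      by_cases h : c ≠ coord ∧ ¬ acc.contains c
      · rw [if_pos h]
        have : (acc ++ [c]).filter (fun c => pend.contains c)
            = acc.filter (fun c => pend.contains c) := by
          simp_all [List.filter_append, List.contains_eq_mem]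
        rw [← ih (acc ++ [c]), this]
      · rw [if_neg h]; exact ih acc

-- The dedup fold over a duplicate-free segment whose keep-condition is characterised by p
-- is just a filter appended to the accumulator.
theorem pv_dedup_seg (coord : Int × Int) (p : Int × Int → Bool) :
    ∀ (L acc : List (Int × Int)), L.Nodup →
      (∀ x ∈ L, (x ≠ coord ∧ x ∉ acc) ↔ p x = true) →
      L.foldl (fun peers c => if c ≠ coord ∧ ¬ peers.contains c then peers ++ [c] else peers) acc
        = acc ++ L.filter p := by
  intro L
  induction L with
  | nil => intro acc _ _; simp
  | cons x L ih =>
    intro acc hnd hp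
    have hx := hp x (by simp)
    have hndL := hnd.of_cons
    have hxL : x ∉ L := by simpa using (List.nodup_cons.mp hnd).1
    simp only [List.foldl_cons, List.filter_cons]
    by_cases hpx : p x = true
    · have hkeep0 : x ≠ coord ∧ x ∉ acc := hx.mpr hpx
      have hkeep : x ≠ coord ∧ ¬ acc.contains x := by
        simpa [List.contains_eq_mem] using hkeep0
      rw [if_pos hkeep, hpx]
      have := ih (acc ++ [x]) hndL (by
        intro y hy
        have hyx : y ≠ x := fun h => hxL (h ▸ hy)
        have := hp y (by simp [hy])
        simpa [hyx] using this)
      rw [this]; simp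
    · rw [if_neg (fun h => hpx (hx.mp (by simpa [List.contains_eq_mem] using h)))]
      simp only [hpx]
      exact ih acc hndL (fun y hy => hp y (by simp [hy]))

-- pyRange a (a+3) 1 written out.
theorem pv_range3 (a : Int) : PySem.List.pyRange a (a + 3) 1 = [a, a + 1, a + 2] := by
  rw [PySem.List.pyRange_one_cons (by omega), PySem.List.pyRange_one_cons (by omega),
      PySem.List.pyRange_one_cons (by omega), PySem.List.pyRange_one_eq_nil (by omega)]
  have h : a + 1 + 1 = a + 2 := by ring
  rw [h]

theorem pv_range9 : PySem.List.pyRange 0 9 1 = [0, 1, 2, 3, 4, 5, 6, 7, 8] := by decide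

-- Core geometric identity: A's dedup of block ++ row ++ column equals the closed-form
-- band-test filters (no accumulator needed).
set_option maxHeartbeats 1000000 in
theorem pv_closed (r c : Int) :
    (([(r/3*3, c/3*3), (r/3*3, c/3*3+1), (r/3*3, c/3*3+2),
      (r/3*3+1, c/3*3), (r/3*3+1, c/3*3+1), (r/3*3+1, c/3*3+2),
      (r/3*3+2, c/3*3), (r/3*3+2, c/3*3+1), (r/3*3+2, c/3*3+2)] : List (Int × Int))
      ++ [(r,0),(r,1),(r,2),(r,3),(r,4),(r,5),(r,6),(r,7),(r,8)]
      ++ [(0,c),(1,c),(2,c),(3,c),(4,c),(5,c),(6,c),(7,c),(8,c)]).foldl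
        (fun peers x => if x ≠ (r, c) ∧ ¬ peers.contains x then peers ++ [x] else peers) []
      = ([(r/3*3, c/3*3), (r/3*3, c/3*3+1), (r/3*3, c/3*3+2),
          (r/3*3+1, c/3*3), (r/3*3+1, c/3*3+1), (r/3*3+1, c/3*3+2),
          (r/3*3+2, c/3*3), (r/3*3+2, c/3*3+1), (r/3*3+2, c/3*3+2)] : List (Int × Int)).filter
            (fun x => decide (x ≠ (r, c)))
        ++ ([(r,0),(r,1),(r,2),(r,3),(r,4),(r,5),(r,6),(r,7),(r,8)] : List (Int × Int)).filter
            (fun x => decide (x.2 / 3 ≠ c / 3))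
        ++ ([(0,c),(1,c),(2,c),(3,c),(4,c),(5,c),(6,c),(7,c),(8,c)] : List (Int × Int)).filter
            (fun x => decide (x.1 / 3 ≠ r / 3)) := by
  have hBf : ∀ u v : Int,
      ((u, v) ∈ ([(r/3*3, c/3*3), (r/3*3, c/3*3+1), (r/3*3, c/3*3+2),
          (r/3*3+1, c/3*3), (r/3*3+1, c/3*3+1), (r/3*3+1, c/3*3+2),
          (r/3*3+2, c/3*3), (r/3*3+2, c/3*3+1), (r/3*3+2, c/3*3+2)] : List (Int × Int)).filter
            (fun x => decide (x ≠ (r, c))))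
        ↔ ((r/3*3 ≤ u ∧ u < r/3*3+3 ∧ c/3*3 ≤ v ∧ v < c/3*3+3) ∧ ¬(u = r ∧ v = c)) := by
    intro u v
    simp only [List.mem_filter, List.mem_cons, List.not_mem_nil, Prod.mk.injEq,
      decide_eq_true_eq, ne_eq, or_false]
    omega
  have hRf : ∀ u v : Int,
      ((u, v) ∈ ([(r,0),(r,1),(r,2),(r,3),(r,4),(r,5),(r,6),(r,7),(r,8)] : List (Int × Int)).filter
            (fun x => decide (x.2 / 3 ≠ c / 3)))
        ↔ (u = r ∧ 0 ≤ v ∧ v ≤ 8 ∧ v / 3 ≠ c / 3) := by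
    intro u v
    simp only [List.mem_filter, List.mem_cons, List.not_mem_nil, Prod.mk.injEq,
      decide_eq_true_eq, ne_eq, or_false]
    omega
  set Bf := ([(r/3*3, c/3*3), (r/3*3, c/3*3+1), (r/3*3, c/3*3+2),
          (r/3*3+1, c/3*3), (r/3*3+1, c/3*3+1), (r/3*3+1, c/3*3+2),
          (r/3*3+2, c/3*3), (r/3*3+2, c/3*3+1), (r/3*3+2, c/3*3+2)] : List (Int × Int)).filter
            (fun x => decide (x ≠ (r, c))) with hBfdef
  set Rf := ([(r,0),(r,1),(r,2),(r,3),(r,4),(r,5),(r,6),(r,7),(r,8)] : List (Int × Int)).filter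
            (fun x => decide (x.2 / 3 ≠ c / 3)) with hRfdef
  rw [List.foldl_append, List.foldl_append]
  rw [pv_dedup_seg (r, c) (fun x => decide (x ≠ (r, c))) _ []
      (by simp [List.nodup_cons, List.mem_cons, Prod.mk.injEq])
      (by intro x _; simp)]
  simp only [List.nil_append, ← hBfdef]
  rw [pv_dedup_seg (r, c) (fun x => decide (x.2 / 3 ≠ c / 3))
      [(r,0),(r,1),(r,2),(r,3),(r,4),(r,5),(r,6),(r,7),(r,8)] Bf
      (by simp [List.nodup_cons, Prod.mk.injEq])
      (by
        intro x hx
        simp only [List.mem_cons, List.not_mem_nil, or_false] at hx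
        rcases hx with rfl|rfl|rfl|rfl|rfl|rfl|rfl|rfl|rfl <;>
          · simp only [hBf, Prod.mk.injEq, decide_eq_true_eq, ne_eq, true_and]
            omega)]
  rw [← hRfdef]
  rw [pv_dedup_seg (r, c) (fun x => decide (x.1 / 3 ≠ r / 3))
      [(0,c),(1,c),(2,c),(3,c),(4,c),(5,c),(6,c),(7,c),(8,c)] (Bf ++ Rf)
      (by simp [List.nodup_cons, Prod.mk.injEq])
      (by
        intro x hx
        simp only [List.mem_cons, List.not_mem_nil, or_false] at hx
        rcases hx with rfl|rfl|rfl|rfl|rfl|rfl|rfl|rfl|rfl <;>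
          · simp only [List.mem_append, hBf, hRf, Prod.mk.injEq, decide_eq_true_eq, ne_eq,
              and_true]
            omega)]

-- "filter (decide P) then filter by pending membership" fuses into one decide-of-∧ filter
-- (the shape B's comprehensions have).
theorem pv_ff (coordP : (Int × Int) → Prop) [DecidablePred coordP]
    (q : (Int × Int) → Bool) :
    ∀ l : List (Int × Int),
      (l.filter (fun x => decide (coordP x))).filter q
        = l.filter (fun x => decide (coordP x ∧ q x)) := by
  intro l
  induction l with
  | nil => rfl
  | cons a l ih =>
    simp only [List.filter_cons]
    by_cases hP : coordP a
    · cases hq : q a <;> simp [hP, hq, ih]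
    · simp [hP, ih]

-- filter over a map along the pairing constructor.
theorem pv_filter_map_pair {l : List Int} {f : Int → Int × Int} {q : Int × Int → Bool} :
    (l.map f).filter q = (l.filter (fun i => q (f i))).map f := by
  induction l with
  | nil => rfl
  | cons a l ih => simp only [List.map_cons, List.filter_cons]; cases h : q (f a) <;> simp [ih]

-- ===== VERDICT (by name: the statement is the Claim_ definition above) =====
set_option maxHeartbeats 1000000 in
theorem effect_range_spec : Claim_equal_effect_range := by
  intro coord pend _
  show effect_range coord pend = effect_range_alt coord pend
  obtain ⟨r, c⟩ := coord
  have h3 : (0:Int) < 3 := by norm_num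
  have hfd : ∀ n : Int, PySem.Int.floordiv n 3 = n / 3 :=
    fun n => PySem.Int.floordiv_eq_ediv_of_pos h3
  have hBA : pvBlockCoordsA (r, c)
      = [(r/3*3, c/3*3), (r/3*3, c/3*3+1), (r/3*3, c/3*3+2),
         (r/3*3+1, c/3*3), (r/3*3+1, c/3*3+1), (r/3*3+1, c/3*3+2),
         (r/3*3+2, c/3*3), (r/3*3+2, c/3*3+1), (r/3*3+2, c/3*3+2)] := by
    unfold pvBlockCoordsA
    simp only [hfd]
    have e1 : (r/3 + 1) * 3 = r/3*3 + 3 := by ring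
    have e2 : (c/3 + 1) * 3 = c/3*3 + 3 := by ring
    rw [e1, e2, pv_range3, pv_range3]
    rfl
  have hRA : pvRowCoordsA (r, c)
      = [(r,0),(r,1),(r,2),(r,3),(r,4),(r,5),(r,6),(r,7),(r,8)] := by
    unfold pvRowCoordsA; rw [pv_range9]; rfl
  have hCA : pvColCoordsA (r, c)
      = [((0:Int),c),(1,c),(2,c),(3,c),(4,c),(5,c),(6,c),(7,c),(8,c)] := by
    unfold pvColCoordsA; rw [pv_range9]; rfl
  -- LHS: A's loop = pending-filter of the dedup fold, then the closed form of the dedup fold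
  unfold effect_range
  simp only [List.foldl_cons, List.foldl_nil, ← List.foldl_append]
  have h0 := pv_interleave_eq_filter_dedup (r, c) pend
    (pvBlockCoordsA (r, c) ++ pvRowCoordsA (r, c) ++ pvColCoordsA (r, c)) []
  simp only [List.filter_nil] at h0
  rw [h0, hBA, hRA, hCA, pv_closed r c, List.filter_append, List.filter_append,
      pv_ff (fun x => x ≠ (r, c)) (fun x => pend.contains x),
      pv_ff (fun x => x.2 / 3 ≠ c / 3) (fun x => pend.contains x),
      pv_ff (fun x => x.1 / 3 ≠ r / 3) (fun x => pend.contains x)]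
  -- RHS: unfold B's port to the same three filtered segments
  show _ = effect_range_alt (r, c) pend
  unfold effect_range_alt
  simp only [hfd]
  rw [pv_range3 (r/3*3), pv_range3 (c/3*3), pv_range9]
  simp only [List.flatMap_cons, List.flatMap_nil, List.map_cons, List.map_nil, List.append_nil]
  rw [← List.filter_append, ← List.filter_append]
  simp only [List.cons_append, List.nil_append]
  rw [show ([(r,0),(r,1),(r,2),(r,3),(r,4),(r,5),(r,6),(r,7),(r,8)] : List (Int × Int))
        = ([0,1,2,3,4,5,6,7,8] : List Int).map (fun i => (r,i)) from rfl,
      show ([(0,c),(1,c),(2,c),(3,c),(4,c),(5,c),(6,c),(7,c),(8,c)] : List (Int × Int))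
        = ([0,1,2,3,4,5,6,7,8] : List Int).map (fun i => (i,c)) from rfl,
      pv_filter_map_pair, pv_filter_map_pair]
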